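-- pv_equiv track=rewrite | github.com/Bnovey/BioE-134-Final-Proj | scripts/generate_test_data.py | make_cigar_md
-- ===== SOURCE A (Python) =====
-- def make_cigar_md(obs, ref):
--     n = min(len(obs), len(ref))
--     clip = abs(len(obs) - len(ref))
--     md_parts, run = [], 0
--     for o, r in zip(obs[:n], ref[:n]):
--         if o == r:
--             run += 1
--         else:
--             if run:
--                 md_parts.append(str(run))
--                 run = 0
--             md_parts.append(r)
--     if run:
--         md_parts.append(str(run))
--     cigar = f"{n}M" + (f"{clip}S" if clip else "")
--     md = "".join(md_parts) if md_parts else str(n)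
--     return cigar, md
-- ===== SOURCE B (Python) =====
-- def make_cigar_md(obs, ref):
--     n = min(len(obs), len(ref))
--     clip = abs(len(obs) - len(ref))
--     md_parts = []
--     i = 0
--     while i < n:
--         same = obs[i] == ref[i]
--         j = i + 1
--         while j < n and (obs[j] == ref[j]) == same:
--             j += 1
--         md_parts.append(str(j - i) if same else ref[i:j])
--         i = j
--     cigar = f"{n}M" + (f"{clip}S" if clip else "")
--     md = "".join(md_parts) if md_parts else str(n)
--     return cigar, md
-- ===== Notes on version B (the rewrite author's own statement) =====
-- stated objective: alternative
-- what changed: B replaces A's per-character accumulator fold (pending-run counter flushed at each mismatch and at the end) by a two-pointer run-length scan over index ranges that emits each run whole, appending a mismatch run as a single reference slice instead of character by character.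
import Mathlib
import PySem

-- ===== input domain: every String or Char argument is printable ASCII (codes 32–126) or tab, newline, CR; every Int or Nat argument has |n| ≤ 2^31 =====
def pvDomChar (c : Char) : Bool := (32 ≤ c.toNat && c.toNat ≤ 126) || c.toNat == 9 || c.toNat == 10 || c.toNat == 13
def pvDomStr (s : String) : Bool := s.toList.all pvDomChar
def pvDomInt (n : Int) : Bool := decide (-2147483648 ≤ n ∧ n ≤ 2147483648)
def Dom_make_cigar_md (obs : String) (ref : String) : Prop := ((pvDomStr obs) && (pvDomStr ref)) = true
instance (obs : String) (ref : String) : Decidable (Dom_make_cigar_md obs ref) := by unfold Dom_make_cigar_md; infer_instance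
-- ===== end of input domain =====

-- B replaces A's per-character run accumulator by a two-pointer run-length scan that emits
-- whole runs (and mismatch runs as one reference slice); objective: alternative, same O(n) cost.

-- ===== PORT A =====
-- the loop body of A ('for o, r in zip(obs[:n], ref[:n])'), state = (md_parts, run);
-- md_parts holds each appended string as its character list ("".join is concatenation = flatten)
def pvStepA (st : List (List Char) × Int) (pr : Char × Char) : List (List Char) × Int :=
  if pr.1 == pr.2 then (st.1, st.2 + 1)
  else ((if st.2 ≠ 0 then st.1 ++ [PySem.Int.toChars st.2] else st.1) ++ [[pr.2]], 0)

def make_cigar_md (obs : String) (ref : String) : String × String :=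
  let lo := obs.toList
  let lr := ref.toList
  let n : Int := min (lo.length : Int) (lr.length : Int)
  let clip : Int := |(lo.length : Int) - (lr.length : Int)|
  let pairs := List.zip (PySem.List.slice lo none (some n)) (PySem.List.slice lr none (some n))
  let st := pairs.foldl pvStepA ([], 0)
  let parts := if st.2 ≠ 0 then st.1 ++ [PySem.Int.toChars st.2] else st.1
  let cigar := PySem.Int.toChars n ++ ['M'] ++ (if clip ≠ 0 then PySem.Int.toChars clip ++ ['S'] else [])
  let md := if parts ≠ [] then parts.flatten else PySem.Int.toChars n
  (String.ofList cigar, String.ofList md)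

-- ===== PORT B =====
-- B's inner 'while j < n and (obs[j] == ref[j]) == same: j += 1', counting from position i+1;
-- the paired traversal obs[i], ref[i] (i < n) is modelled by the zipped character list (exact)
def pvRunLen (same : Bool) : List (Char × Char) → Nat
  | [] => 0
  | p :: ps => if (p.1 == p.2) == same then pvRunLen same ps + 1 else 0

-- B's outer while loop over i; each step emits one run: str(j - i) for a match run,
-- the reference slice ref[i:j] for a mismatch run, then i = j
def pvMdB : List (Char × Char) → List (List Char)
  | [] => []
  | p :: ps =>
    let same := p.1 == p.2
    let k := pvRunLen same ps
    (if same then PySem.Int.toChars ((k : Int) + 1) else (p :: ps.take k).map Prod.snd)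
      :: pvMdB (ps.drop k)
termination_by ps => ps.length
decreasing_by simp

def make_cigar_md_alt (obs : String) (ref : String) : String × String :=
  let lo := obs.toList
  let lr := ref.toList
  let n : Int := min (lo.length : Int) (lr.length : Int)
  let clip : Int := |(lo.length : Int) - (lr.length : Int)|
  let pairs := List.zip (PySem.List.slice lo none (some n)) (PySem.List.slice lr none (some n))
  let parts := pvMdB pairs
  let cigar := PySem.Int.toChars n ++ ['M'] ++ (if clip ≠ 0 then PySem.Int.toChars clip ++ ['S'] else [])
  let md := if parts ≠ [] then parts.flatten else PySem.Int.toChars n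
  (String.ofList cigar, String.ofList md)

-- ===== PRECONDITION & SPEC =====
def Spec_make_cigar_md (obs : String) (ref : String) (out : String × String) : Prop := out = make_cigar_md_alt obs ref
instance (obs : String) (ref : String) (out : String × String) : Decidable (Spec_make_cigar_md obs ref out) := by unfold Spec_make_cigar_md; infer_instance

-- ===== CLAIM (what is proved, stated in full; the proofs are below) =====
def Claim_equal_make_cigar_md : Prop := ∀ (obs : String) (ref : String), Dom_make_cigar_md obs ref → Spec_make_cigar_md obs ref (make_cigar_md obs ref)

-- ===== LEMMAS AND PROOFS =====

-- the MD character stream both programs produce, as a single forward recursion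
def pvMdSpec : List (Char × Char) → Int → List Char
  | [], run => if run ≠ 0 then PySem.Int.toChars run else []
  | p :: ps, run =>
    if p.1 == p.2 then pvMdSpec ps (run + 1)
    else (if run ≠ 0 then PySem.Int.toChars run else []) ++ p.2 :: pvMdSpec ps 0

-- A's post-loop flush of the pending run
def pvFinA (st : List (List Char) × Int) : List (List Char) :=
  if st.2 ≠ 0 then st.1 ++ [PySem.Int.toChars st.2] else st.1

theorem pvMdB_nil : pvMdB [] = [] := by rw [pvMdB.eq_def]

theorem pvMdB_cons (p : Char × Char) (ps : List (Char × Char)) :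
    pvMdB (p :: ps) =
      (if p.1 == p.2 then PySem.Int.toChars ((pvRunLen (p.1 == p.2) ps : Nat) + 1)
       else (p :: ps.take (pvRunLen (p.1 == p.2) ps)).map Prod.snd)
        :: pvMdB (ps.drop (pvRunLen (p.1 == p.2) ps)) := by
  rw [pvMdB.eq_def]

theorem pvA1 (ps : List (Char × Char)) : ∀ (parts : List (List Char)) (run : Int),
    (pvFinA (ps.foldl pvStepA (parts, run))).flatten = parts.flatten ++ pvMdSpec ps run := by
  induction ps with
  | nil =>
    intro parts run
    simp only [List.foldl_nil, pvFinA, pvMdSpec]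
    split_ifs <;> simp
  | cons p ps ih =>
    intro parts run
    rw [List.foldl_cons]
    by_cases h : p.1 == p.2
    · rw [show pvStepA (parts, run) p = (parts, run + 1) from by simp [pvStepA, h]]
      rw [ih]
      simp [pvMdSpec, h]
    · rw [show pvStepA (parts, run) p
          = ((if run ≠ 0 then parts ++ [PySem.Int.toChars run] else parts) ++ [[p.2]], 0) from by
        simp only [pvStepA, h]; simp]
      rw [ih]
      simp only [pvMdSpec, h]
      split_ifs <;> simp_all

theorem pvAE (ps : List (Char × Char)) : ∀ (parts : List (List Char)) (run : Int), 0 ≤ run →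
    pvFinA (ps.foldl pvStepA (parts, run)) = [] → parts = [] ∧ run = 0 ∧ ps = [] := by
  induction ps with
  | nil =>
    intro parts run _ h
    rw [List.foldl_nil, pvFinA] at h
    split_ifs at h with hr
    · simp at h
    · exact ⟨h, by omega, rfl⟩
  | cons p ps ih =>
    intro parts run hrun h
    rw [List.foldl_cons] at h
    by_cases hp : p.1 == p.2
    · rw [show pvStepA (parts, run) p = (parts, run + 1) from by simp [pvStepA, hp]] at h
      have := ih parts (run + 1) (by omega) h
      omega
    · rw [show pvStepA (parts, run) p
          = ((if run ≠ 0 then parts ++ [PySem.Int.toChars run] else parts) ++ [[p.2]], 0) from by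
        simp only [pvStepA, hp]; simp] at h
      have := ih _ 0 (by omega) h
      simp at this

theorem pvBmatch (ps : List (Char × Char)) : ∀ (run : Int), 0 < run →
    pvMdSpec ps run
    = PySem.Int.toChars (run + (pvRunLen true ps : Int))
      ++ pvMdSpec (ps.drop (pvRunLen true ps)) 0 := by
  induction ps with
  | nil => intro run h; simp [pvMdSpec, pvRunLen]; omega
  | cons p ps ih =>
    intro run h
    by_cases hp : p.1 == p.2
    · simp [pvMdSpec, pvRunLen, hp, ih (run + 1) (by omega)]
      congr 1
      ring
    · have hr : run ≠ 0 := by omega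
      simp [pvMdSpec, pvRunLen, hp, hr]

theorem pvBmis (ps : List (Char × Char)) :
    pvMdSpec ps 0
    = (ps.take (pvRunLen false ps)).map Prod.snd
      ++ pvMdSpec (ps.drop (pvRunLen false ps)) 0 := by
  induction ps with
  | nil => simp [pvMdSpec, pvRunLen]
  | cons p ps ih =>
    by_cases hp : p.1 == p.2
    · simp [pvRunLen, hp]
    · have hr : pvRunLen false (p :: ps) = pvRunLen false ps + 1 := by simp [pvRunLen, hp]
      rw [hr, List.take_succ_cons, List.drop_succ_cons, List.map_cons]
      simp only [pvMdSpec, hp]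
      simp [ih]

theorem pvBJ (N : Nat) : ∀ ps : List (Char × Char), ps.length ≤ N →
    (pvMdB ps).flatten = pvMdSpec ps 0 := by
  induction N with
  | zero =>
    intro ps h
    have hnil : ps = [] := by cases ps <;> simp_all
    subst hnil
    rw [pvMdB_nil]
    simp [pvMdSpec]
  | succ N ih =>
    intro ps h
    cases ps with
    | nil => rw [pvMdB_nil]; simp [pvMdSpec]
    | cons p ps =>
      rw [pvMdB_cons]
      by_cases hp : p.1 == p.2
      · have hrest := ih (ps.drop (pvRunLen true ps)) (by simp at h ⊢; omega)
        simp only [hp, if_pos, List.flatten_cons, hrest]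
        simp only [pvMdSpec, hp, if_pos]
        rw [show (0:Int) + 1 = 1 from by ring, pvBmatch ps 1 (by omega),
          show (1:Int) + (pvRunLen true ps : Int) = (pvRunLen true ps : Int) + 1 from by ring]
      · have hrest := ih (ps.drop (pvRunLen false ps)) (by simp at h ⊢; omega)
        simp only [hp, Bool.false_eq_true, if_false, List.flatten_cons, hrest]
        simp only [pvMdSpec, hp, Bool.false_eq_true, if_false]
        rw [pvBmis ps]
        simp

-- the two md computations agree, for any pair list and fallback argument
theorem pvMain (pairs : List (Char × Char)) (n : Int) :
    (if pvFinA (pairs.foldl pvStepA ([], 0)) ≠ [] then (pvFinA (pairs.foldl pvStepA ([], 0))).flatten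
     else PySem.Int.toChars n)
    = (if pvMdB pairs ≠ [] then (pvMdB pairs).flatten else PySem.Int.toChars n) := by
  cases hps : pairs with
  | nil =>
    rw [pvMdB_nil]
    simp [pvFinA]
  | cons p ps =>
    have hAne : pvFinA ((p :: ps).foldl pvStepA ([], 0)) ≠ [] := by
      intro hc
      have := pvAE (p :: ps) [] 0 (by omega) hc
      simp at this
    have hBne : pvMdB (p :: ps) ≠ [] := by rw [pvMdB_cons]; simp
    rw [if_pos hAne, if_pos hBne, pvA1 (p :: ps) [] 0, pvBJ (p :: ps).length (p :: ps) (le_refl _)]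
    simp

-- ===== VERDICT (by name: the statement is the Claim_ definition above) =====
theorem make_cigar_md_spec : Claim_equal_make_cigar_md := by
  intro obs ref _
  unfold Spec_make_cigar_md make_cigar_md make_cigar_md_alt
  dsimp only
  refine congrArg₂ Prod.mk rfl (congrArg String.ofList ?_)
  exact pvMain _ _
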